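-- pv_equiv track=rewrite | github.com/Abdullah25Mohammad/WaveFunctionCollapse | WFC_EntropyPropogation.py | add_tile_to_dict
-- ===== SOURCE A (Python) =====
-- def add_tile_to_dict(image_list):
--     data = {}
--     for i in range(len(image_list)):
--         row = image_list[i]
--         for j in range(len(row)):
--             tile = row[j]
--             if tile not in data:
--                 data[tile] = {
--                     "up": [],
--                     "left": [],
--                     "down": [],
--                     "right": []
--                 }
--             tile_info = data[tile]
--
--             if i > 0:
--                 top = image_list[i-1][j]
--                 tile_info["up"].append(top)
--             if j > 0:
--                 left = image_list[i][j-1]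
--                 tile_info["left"].append(left)
--             if i < len(image_list) - 1:
--                 down = image_list[i+1][j]
--                 tile_info["down"].append(down)
--             if j < len(row) - 1:
--                 right = image_list[i][j+1]
--                 tile_info["right"].append(right)
--
--             data[tile] = tile_info
--     return data
-- ===== SOURCE B (Python) =====
-- def add_tile_to_dict(image_list):
--     h = len(image_list)
--
--     # one pass: index of all occurrence positions of each tile, in row-major order
--     occ = {}
--     for i in range(h):
--         row = image_list[i]
--         for j in range(len(row)):
--             t = row[j]
--             if t not in occ:
--                 occ[t] = []
--             occ[t].append((i, j))
--
--     # key-major: each tile's four neighbour lists straight from its positions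
--     def info(ps):
--         return {
--             "up":    [image_list[i-1][j] for (i, j) in ps if i > 0],
--             "left":  [image_list[i][j-1] for (i, j) in ps if j > 0],
--             "down":  [image_list[i+1][j] for (i, j) in ps if i < h - 1],
--             "right": [image_list[i][j+1] for (i, j) in ps if j < len(image_list[i]) - 1],
--         }
--
--     return {t: info(ps) for t, ps in occ.items()}
-- ===== Notes on version B (the rewrite author's own statement) =====
-- stated objective: alternative
-- what changed: A builds the nested result dict cell-major, mutating the current tile's entry once per cell; B instead builds a hash index grouping each tile's occurrence positions in one pass and then constructs each tile's four direction lists key-major with comprehensions over its position list.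
import Mathlib
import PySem

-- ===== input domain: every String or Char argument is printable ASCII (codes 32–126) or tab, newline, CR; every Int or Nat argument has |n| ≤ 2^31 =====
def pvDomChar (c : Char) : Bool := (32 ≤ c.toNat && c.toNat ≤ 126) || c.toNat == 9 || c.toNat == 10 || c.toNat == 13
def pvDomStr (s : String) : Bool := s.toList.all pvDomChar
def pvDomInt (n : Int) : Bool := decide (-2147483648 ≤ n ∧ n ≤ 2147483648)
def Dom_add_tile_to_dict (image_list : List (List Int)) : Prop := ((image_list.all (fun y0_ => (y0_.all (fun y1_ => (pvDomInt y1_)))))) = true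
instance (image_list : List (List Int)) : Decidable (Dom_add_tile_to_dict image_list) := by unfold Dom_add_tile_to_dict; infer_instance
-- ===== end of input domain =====

-- One honest line: B replaces A's cell-major pass that mutates the nested result dict per cell by
-- a grouping index (one pass collecting each tile's occurrence positions) followed by a key-major
-- construction of each tile's four neighbour lists; similar cost (objective: alternative).

-- ===== PORT A =====
-- image_list[i][j]; where Python would raise IndexError the port yields the default
-- (such inputs are excluded by Pre_add_tile_to_dict below; exact whenever the indices are valid)
def pvAt (g : List (List Int)) (i j : Int) : Int :=
  PySem.List.pyGetD (PySem.List.pyGetD g i []) j 0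

def pvEmptyInfo : PySem.Dict String (List Int) :=
  PySem.Dict.mk [("up", []), ("left", []), ("down", []), ("right", [])]

def add_tile_to_dict (image_list : List (List Int)) : List (Int × List (String × List Int)) :=
  let data : PySem.Dict Int (PySem.Dict String (List Int)) :=
    (PySem.List.pyRange 0 (image_list.length : Int) 1).foldl (fun data i =>
      let row := PySem.List.pyGetD image_list i []
      (PySem.List.pyRange 0 (row.length : Int) 1).foldl (fun data j =>
        let tile := PySem.List.pyGetD row j 0
        let data := if data.contains tile then data else data.insert tile pvEmptyInfo
        let tile_info := data.getD tile pvEmptyInfo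
        let tile_info := if i > 0 then tile_info.modify "up" [] (· ++ [pvAt image_list (i-1) j]) else tile_info
        let tile_info := if j > 0 then tile_info.modify "left" [] (· ++ [PySem.List.pyGetD row (j-1) 0]) else tile_info
        let tile_info := if i < (image_list.length : Int) - 1 then tile_info.modify "down" [] (· ++ [pvAt image_list (i+1) j]) else tile_info
        let tile_info := if j < (row.length : Int) - 1 then tile_info.modify "right" [] (· ++ [PySem.List.pyGetD row (j+1) 0]) else tile_info
        data.insert tile tile_info) data) PySem.Dict.empty
  data.items.map (fun p => (p.1, p.2.items))

-- ===== PORT B =====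
-- one row-major pass groups the occurrence positions of each tile (insertion-ordered dict)
def pvGroup (image_list : List (List Int)) : PySem.Dict Int (List (Int × Int)) :=
  (PySem.List.pyRange 0 (image_list.length : Int) 1).foldl (fun occ i =>
    let row := PySem.List.pyGetD image_list i []
    (PySem.List.pyRange 0 (row.length : Int) 1).foldl (fun occ j =>
      let t := PySem.List.pyGetD row j 0
      let occ := if occ.contains t then occ else occ.insert t []
      occ.insert t (occ.getD t [] ++ [(i, j)])) occ) PySem.Dict.empty

-- a tile's four neighbour lists, straight from its position list
def pvInfo (image_list : List (List Int)) (ps : List (Int × Int)) : List (String × List Int) :=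
  [("up",    (ps.filter (fun p => p.1 > 0)).map (fun p => pvAt image_list (p.1 - 1) p.2)),
   ("left",  (ps.filter (fun p => p.2 > 0)).map (fun p => pvAt image_list p.1 (p.2 - 1))),
   ("down",  (ps.filter (fun p => p.1 < (image_list.length : Int) - 1)).map (fun p => pvAt image_list (p.1 + 1) p.2)),
   ("right", (ps.filter (fun p => p.2 < ((PySem.List.pyGetD image_list p.1 []).length : Int) - 1)).map (fun p => pvAt image_list p.1 (p.2 + 1)))]

def add_tile_to_dict_alt (image_list : List (List Int)) : List (Int × List (String × List Int)) :=
  (pvGroup image_list).items.map (fun q => (q.1, pvInfo image_list q.2))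

-- ===== PRECONDITION & SPEC =====
-- Pre_ excludes exactly the ragged grids (two rows of different length), on which the Python A
-- raises IndexError while reading a vertical neighbour; A returns normally on every rectangular grid.
def Pre_add_tile_to_dict (image_list : List (List Int)) : Prop :=
  ∀ r ∈ image_list, r.length = (image_list.headD []).length
instance (image_list : List (List Int)) : Decidable (Pre_add_tile_to_dict image_list) := by unfold Pre_add_tile_to_dict; infer_instance

def pvWitness_add_tile_to_dict : List (List Int) := [[1, 2], [2, 1]]

def Spec_add_tile_to_dict (image_list : List (List Int)) (out : List (Int × List (String × List Int))) : Prop := out = add_tile_to_dict_alt image_list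
instance (image_list : List (List Int)) (out : List (Int × List (String × List Int))) : Decidable (Spec_add_tile_to_dict image_list out) := by unfold Spec_add_tile_to_dict; infer_instance

-- ===== CLAIM (what is proved, stated in full; the proofs are below) =====
def Claim_equal_add_tile_to_dict : Prop := ∀ (image_list : List (List Int)), Dom_add_tile_to_dict image_list → Pre_add_tile_to_dict image_list → Spec_add_tile_to_dict image_list (add_tile_to_dict image_list)

-- ===== LEMMAS AND PROOFS =====

-- proof-side helpers: the row-major list of cell positions, the per-cell update of a tile's
-- direction dict, and A's per-cell dict step
def pvCells (g : List (List Int)) : List (Int × Int) :=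
  (PySem.List.pyRange 0 (g.length : Int) 1).flatMap (fun i =>
    (PySem.List.pyRange 0 ((PySem.List.pyGetD g i []).length : Int) 1).map (fun j => (i, j)))

def pvApp4 (g : List (List Int)) (p : Int × Int) (ti : PySem.Dict String (List Int)) : PySem.Dict String (List Int) :=
  let ti := if p.1 > 0 then ti.modify "up" [] (· ++ [pvAt g (p.1 - 1) p.2]) else ti
  let ti := if p.2 > 0 then ti.modify "left" [] (· ++ [pvAt g p.1 (p.2 - 1)]) else ti
  let ti := if p.1 < (g.length : Int) - 1 then ti.modify "down" [] (· ++ [pvAt g (p.1 + 1) p.2]) else ti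
  if p.2 < ((PySem.List.pyGetD g p.1 []).length : Int) - 1 then ti.modify "right" [] (· ++ [pvAt g p.1 (p.2 + 1)]) else ti

def pvStep (g : List (List Int)) (d : PySem.Dict Int (PySem.Dict String (List Int))) (p : Int × Int) :
    PySem.Dict Int (PySem.Dict String (List Int)) :=
  d.insert (pvAt g p.1 p.2) (pvApp4 g p (d.getD (pvAt g p.1 p.2) pvEmptyInfo))

def pvMk4 (u l d r : List Int) : PySem.Dict String (List Int) :=
  PySem.Dict.mk [("up", u), ("left", l), ("down", d), ("right", r)]

-- fold over a flatMap is the nested fold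
theorem pv_foldl_flatMap {α β γ : Type} (l : List α) (f : α → List β) (s : γ → β → γ) (init : γ) :
    (l.flatMap f).foldl s init = l.foldl (fun acc x => (f x).foldl s acc) init := by
  induction l generalizing init with
  | nil => rfl
  | cons a t ih => simp [List.flatMap_cons, List.foldl_append, ih]

-- PySem.Set.update of a list already a Set from []: -- not needed

-- the four literal modifies on a 4-entry dict
theorem pv_mod_up (u l d r : List Int) (f : List Int → List Int) :
    (pvMk4 u l d r).modify "up" [] f = pvMk4 (f u) l d r := rfl
theorem pv_mod_left (u l d r : List Int) (f : List Int → List Int) :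
    (pvMk4 u l d r).modify "left" [] f = pvMk4 u (f l) d r := rfl
theorem pv_mod_down (u l d r : List Int) (f : List Int → List Int) :
    (pvMk4 u l d r).modify "down" [] f = pvMk4 u l (f d) r := rfl
theorem pv_mod_right (u l d r : List Int) (f : List Int → List Int) :
    (pvMk4 u l d r).modify "right" [] f = pvMk4 u l d (f r) := rfl

-- one pvApp4 step on a literal 4-entry dict
theorem pv_app4_mk4 (g : List (List Int)) (p : Int × Int) (u l d r : List Int) :
    pvApp4 g p (pvMk4 u l d r) =
      pvMk4 (u ++ if p.1 > 0 then [pvAt g (p.1 - 1) p.2] else [])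
            (l ++ if p.2 > 0 then [pvAt g p.1 (p.2 - 1)] else [])
            (d ++ if p.1 < (g.length : Int) - 1 then [pvAt g (p.1 + 1) p.2] else [])
            (r ++ if p.2 < ((PySem.List.pyGetD g p.1 []).length : Int) - 1 then [pvAt g p.1 (p.2 + 1)] else []) := by
  unfold pvApp4
  split_ifs <;>
    simp [pv_mod_up, pv_mod_left, pv_mod_down, pv_mod_right]

-- folding pvApp4 over a list of cells fills the four direction lists
theorem pv_foldl_app4 (g : List (List Int)) (cs : List (Int × Int)) (u l d r : List Int) :
    cs.foldl (fun ti p => pvApp4 g p ti) (pvMk4 u l d r) =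
      pvMk4 (u ++ (cs.filter (fun p => p.1 > 0)).map (fun p => pvAt g (p.1 - 1) p.2))
            (l ++ (cs.filter (fun p => p.2 > 0)).map (fun p => pvAt g p.1 (p.2 - 1)))
            (d ++ (cs.filter (fun p => p.1 < (g.length : Int) - 1)).map (fun p => pvAt g (p.1 + 1) p.2))
            (r ++ (cs.filter (fun p => p.2 < ((PySem.List.pyGetD g p.1 []).length : Int) - 1)).map (fun p => pvAt g p.1 (p.2 + 1))) := by
  induction cs generalizing u l d r with
  | nil => simp
  | cons c t ih =>
    simp only [List.foldl_cons, pv_app4_mk4, ih, List.filter_cons, decide_eq_true_eq]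
    split_ifs <;> simp

-- A's per-cell body (registration + mutation + write-back) is one insert of the updated info
theorem pv_body (g : List (List Int)) (d : PySem.Dict Int (PySem.Dict String (List Int))) (i j : Int) :
    ((if d.contains (pvAt g i j) then d else d.insert (pvAt g i j) pvEmptyInfo).insert (pvAt g i j)
      (pvApp4 g (i, j)
        ((if d.contains (pvAt g i j) then d else d.insert (pvAt g i j) pvEmptyInfo).getD (pvAt g i j) pvEmptyInfo)))
    = pvStep g d (i, j) := by
  by_cases h : d.contains (pvAt g i j)
  · simp [h, pvStep]
  · have h' : d.contains (pvAt g i j) = false := by simpa using h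
    simp only [h', Bool.false_eq_true, if_false]
    rw [PySem.Dict.getD_insert_self, PySem.Dict.insert_insert_self]
    unfold pvStep
    rw [PySem.Dict.getD_of_not_contains d pvEmptyInfo h']

theorem pvStep_def (g : List (List Int)) :
    pvStep g = fun d p => d.insert (pvAt g p.1 p.2) (pvApp4 g p (d.getD (pvAt g p.1 p.2) pvEmptyInfo)) := rfl

-- A's dict fold is the fold of pvStep over the cell list
theorem pv_A_fold (g : List (List Int)) :
    add_tile_to_dict g =
      ((pvCells g).foldl (pvStep g) PySem.Dict.empty).items.map (fun p => (p.1, p.2.items)) := by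
  unfold add_tile_to_dict pvCells
  dsimp only
  rw [pv_foldl_flatMap]
  congr 2
  apply PySem.List.foldl_congr_mem
  intro data i _
  dsimp only
  rw [List.foldl_map]
  apply PySem.List.foldl_congr_mem
  intro d j _
  dsimp only
  exact pv_body g d i j

-- getD after the pvStep fold
theorem pv_getD_fold (g : List (List Int)) (cs : List (Int × Int))
    (d : PySem.Dict Int (PySem.Dict String (List Int))) (t : Int) :
    ((cs.foldl (pvStep g) d).getD t pvEmptyInfo) =
      (cs.filter (fun p => pvAt g p.1 p.2 == t)).foldl (fun ti p => pvApp4 g p ti) (d.getD t pvEmptyInfo) := by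
  induction cs generalizing d with
  | nil => rfl
  | cons c cs ih =>
    simp only [List.foldl_cons, List.filter_cons, ih]
    by_cases h : pvAt g c.1 c.2 = t
    · simp [pvStep, h]
    · have hb : (pvAt g c.1 c.2 == t) = false := by simp [h]
      simp [pvStep, hb, PySem.Dict.getD_insert, Ne.symm h]

-- B's grouping step: registration + append is one insert of the extended list
def pvGStep (g : List (List Int)) (d : PySem.Dict Int (List (Int × Int))) (p : Int × Int) :
    PySem.Dict Int (List (Int × Int)) :=
  d.insert (pvAt g p.1 p.2) (d.getD (pvAt g p.1 p.2) [] ++ [p])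

theorem pvGStep_def (g : List (List Int)) :
    pvGStep g = fun d p => d.insert (pvAt g p.1 p.2) (d.getD (pvAt g p.1 p.2) [] ++ [p]) := rfl

theorem pv_gbody (g : List (List Int)) (d : PySem.Dict Int (List (Int × Int))) (i j : Int) :
    ((if d.contains (pvAt g i j) then d else d.insert (pvAt g i j) []).insert (pvAt g i j)
      ((if d.contains (pvAt g i j) then d else d.insert (pvAt g i j) []).getD (pvAt g i j) [] ++ [(i, j)]))
    = pvGStep g d (i, j) := by
  by_cases h : d.contains (pvAt g i j)
  · simp [h, pvGStep]
  · have h' : d.contains (pvAt g i j) = false := by simpa using h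
    simp only [h', Bool.false_eq_true, if_false]
    rw [PySem.Dict.getD_insert_self, PySem.Dict.insert_insert_self]
    unfold pvGStep
    rw [PySem.Dict.getD_of_not_contains d [] h']

-- B's grouping dict is the fold of pvGStep over the cell list
theorem pv_G_fold (g : List (List Int)) :
    pvGroup g = (pvCells g).foldl (pvGStep g) PySem.Dict.empty := by
  unfold pvGroup pvCells
  rw [pv_foldl_flatMap]
  apply PySem.List.foldl_congr_mem
  intro occ i _
  dsimp only
  rw [List.foldl_map]
  apply PySem.List.foldl_congr_mem
  intro d j _
  dsimp only
  exact pv_gbody g d i j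

-- getD after the grouping fold: the filtered cell list
theorem pv_getD_gfold (g : List (List Int)) (cs : List (Int × Int))
    (d : PySem.Dict Int (List (Int × Int))) (t : Int) :
    ((cs.foldl (pvGStep g) d).getD t []) =
      d.getD t [] ++ cs.filter (fun p => pvAt g p.1 p.2 == t) := by
  induction cs generalizing d with
  | nil => simp
  | cons c cs ih =>
    simp only [List.foldl_cons, List.filter_cons, ih]
    by_cases h : pvAt g c.1 c.2 = t
    · simp [pvGStep, h]
    · have hb : (pvAt g c.1 c.2 == t) = false := by simp [h]
      simp [pvGStep, hb, PySem.Dict.getD_insert, Ne.symm h]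

-- the two ports agree on every input
theorem pv_main (g : List (List Int)) : add_tile_to_dict g = add_tile_to_dict_alt g := by
  have hnodupA : ((pvCells g).foldl (pvStep g) PySem.Dict.empty).keys.Nodup := by
    rw [pvStep_def]
    exact PySem.Dict.nodup_keys_foldl_insert_key (pvCells g) (fun p => pvAt g p.1 p.2)
      (fun d p => pvApp4 g p (d.getD (pvAt g p.1 p.2) pvEmptyInfo)) PySem.Dict.empty (by simp)
  have hnodupG : ((pvCells g).foldl (pvGStep g) PySem.Dict.empty).keys.Nodup := by
    rw [pvGStep_def]
    exact PySem.Dict.nodup_keys_foldl_insert_key (pvCells g) (fun p => pvAt g p.1 p.2)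
      (fun d p => d.getD (pvAt g p.1 p.2) [] ++ [p]) PySem.Dict.empty (by simp)
  have hkeys : ((pvCells g).foldl (pvStep g) PySem.Dict.empty).keys
      = ((pvCells g).foldl (pvGStep g) PySem.Dict.empty).keys := by
    rw [pvStep_def, pvGStep_def, PySem.Dict.keys_foldl_insert_key, PySem.Dict.keys_foldl_insert_key]
    rfl
  rw [pv_A_fold, PySem.Dict.items_eq_map_keys _ hnodupA pvEmptyInfo, hkeys, List.map_map]
  unfold add_tile_to_dict_alt
  rw [pv_G_fold, PySem.Dict.items_eq_map_keys _ hnodupG [], List.map_map]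
  apply List.map_congr_left
  intro t _
  simp only [Function.comp_apply]
  rw [pv_getD_fold, pv_getD_gfold]
  have he : PySem.Dict.empty.getD t pvEmptyInfo = pvMk4 [] [] [] [] := rfl
  rw [he, pv_foldl_app4, PySem.Dict.getD_empty]
  simp [pvMk4, pvInfo]

-- ===== VERDICT (by name: the statement is the Claim_ definition above) =====
theorem add_tile_to_dict_spec : Claim_equal_add_tile_to_dict := by
  intro g _ _
  unfold Spec_add_tile_to_dict
  exact pv_main g
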